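-- pv_equiv track=rewrite | github.com/Byongho96/algorithm_practice | Baekjoon/23040_누텔라_트리_Easy.py | solution
-- ===== SOURCE A (Python) =====
-- from typing import List, Tuple
-- from collections import defaultdict
--
-- def memoize(N: int, adjLst: Tuple[List[int]], colors: str, start: int) -> List[int]:
--     memo = [-1] * (N + 1)
--     red_group = defaultdict(set)
--     stack = []
--
--     cur, black = start, start
--
--     while True:
--         # 노드 방문
--         memo[cur] = 0
--
--         # 깊이 우선 탐색
--         for adj in adjLst[cur]:
--
--             if memo[adj] > -1:
--                 continue
--
--             stack.append((cur, black))
--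
--             cur = adj
--             if colors[cur] == 'B':
--                 black = cur
--             else:
--                 red_group[black].add(cur)
--             break
--
--         else:
--             if stack:
--                 cur, black = stack.pop()
--                 if cur == black: # colors[cur] == 'B'
--                     num_red = len(red_group[cur])
--                     for red in red_group[cur]:
--                         memo[red] = num_red
--                     del red_group[cur]
--
--             else:
--                 break
--
--     return memo
--
-- def solution(N:int, adjLst:Tuple[List[int]], colors:str) -> int:
--     black = colors.find('B')
--     if black < 0:
--         return  0
--
--     memo = memoize(N, adjLst, colors, black)
--
--     answer = 0
--     for start in range(1, len(colors)):
--         if colors[start] != 'B':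
--             continue
--
--         for adj in adjLst[start]:
--             answer += memo[adj]
--
--     return answer
-- ===== SOURCE B (Python) =====
-- def solution(N, adjLst, colors):
--     start = colors.find('B')
--     if start < 0:
--         return 0
--
--     # Iterative DFS with a per-node adjacency pointer: every adjacency list is
--     # scanned once in total instead of being rescanned from index 0 after each
--     # return to a node.
--     memo = [-1] * (N + 1)
--     ptr = [0] * len(adjLst)
--     red_group = {}
--     stack = []
--     cur, black = start, start
--     memo[start] = 0
--
--     while True:
--         row = adjLst[cur]
--         i = ptr[cur]
--         while i < len(row) and memo[row[i]] > -1: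
--             i += 1
--         ptr[cur] = i
--         if i < len(row):
--             nxt = row[i]
--             stack.append((cur, black))
--             cur = nxt
--             memo[cur] = 0
--             if colors[cur] == 'B':
--                 black = cur
--             else:
--                 red_group.setdefault(black, set()).add(cur)
--         else:
--             if not stack:
--                 break
--             cur, black = stack.pop()
--             if cur == black:
--                 group = red_group.pop(cur, ())
--                 n = len(group)
--                 for red in group:
--                     memo[red] = n
--
--     return sum(memo[adj]
--                for v in range(1, len(colors)) if colors[v] == 'B'
--                for adj in adjLst[v])
-- ===== Notes on version B (the rewrite author's own statement) =====
-- stated objective: alternative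
-- what changed: A's DFS rescans the current node's whole adjacency list from index 0 after every return to it; B keeps a per-node adjacency pointer so each adjacency list is scanned once in total (not measurably faster on the generated inputs), and computes the final answer as one fold over a filtered flatMap instead of a guarded nested loop.
-- outside the precondition, e.g. on solution(3, ([], [], [], []), '_B'): A returns 0, B returns 0
import Mathlib
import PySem

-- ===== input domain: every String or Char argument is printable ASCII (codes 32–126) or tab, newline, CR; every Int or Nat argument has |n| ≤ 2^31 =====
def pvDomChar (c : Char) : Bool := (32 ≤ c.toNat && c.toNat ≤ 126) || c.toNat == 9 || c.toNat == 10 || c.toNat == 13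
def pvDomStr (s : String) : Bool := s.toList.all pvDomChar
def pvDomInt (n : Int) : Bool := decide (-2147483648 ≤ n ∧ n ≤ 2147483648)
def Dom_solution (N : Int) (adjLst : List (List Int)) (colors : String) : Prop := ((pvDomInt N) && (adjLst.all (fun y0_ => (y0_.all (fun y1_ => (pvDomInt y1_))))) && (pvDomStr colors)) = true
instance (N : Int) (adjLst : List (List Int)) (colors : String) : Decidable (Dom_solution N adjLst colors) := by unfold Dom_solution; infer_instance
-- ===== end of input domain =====

-- B replaces A's DFS that rescans each adjacency list from index 0 after every return to a node
-- by a DFS keeping a per-node adjacency pointer, so each list is scanned once in total.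
-- Proved: equal return values on Pre_solution (the ports are fuel-guarded for totality only).

-- ===== PORT A =====
-- A's inner while-True loop of `memoize`: state (memo, red_group, stack, cur, black); the fuel
-- only makes the recursion total — on Pre_ inputs it is never exhausted (2 + visits + pops bound).
def memoizeLoopA (adjLst : List (List Int)) (cs : List Char) :
    Nat → List Int → PySem.Dict Int (PySem.Set Int) → List (Int × Int) → Int → Int → List Int
  | fuel, memo, rg, stack, cur, black =>
    let memo1 := memo.set cur.toNat 0                       -- memo[cur] = 0
    match fuel with
    | 0 => memo1
    | fuel + 1 =>
      -- `for adj in adjLst[cur]: if memo[adj] > -1: continue; … break / else: …`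
      match (adjLst.getD cur.toNat []).find? (fun adj => decide (memo1.getD adj.toNat (-1) ≤ -1)) with
      | some adj =>
        if cs.getD adj.toNat ' ' = 'B' then
          memoizeLoopA adjLst cs fuel memo1 rg ((cur, black) :: stack) adj adj
        else
          memoizeLoopA adjLst cs fuel memo1
            (rg.insert black (PySem.Set.add ((rg.get? black).getD PySem.Set.empty) adj))
            ((cur, black) :: stack) adj black
      | none =>
        match stack with
        | [] => memo1
        | (c, b) :: rest =>
          if c = b then
            let grp : PySem.Set Int := (rg.get? c).getD PySem.Set.empty
            memoizeLoopA adjLst cs fuel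
              (grp.foldl (fun m r => m.set r.toNat (grp.length : Int)) memo1)
              (rg.erase c) rest c b
          else
            memoizeLoopA adjLst cs fuel memo1 rg rest c b

def memoizeA (N : Int) (adjLst : List (List Int)) (cs : List Char) (start : Int) : List Int :=
  memoizeLoopA adjLst cs (2 * (N + 1).toNat + 2) (List.replicate (N + 1).toNat (-1))
    PySem.Dict.empty [] start start

def solution (N : Int) (adjLst : List (List Int)) (colors : String) : Int :=
  let black := PySem.Str.find colors "B"
  if black < 0 then 0
  else
    let memo := memoizeA N adjLst colors.toList black
    (PySem.List.pyRange 1 (colors.toList.length : Int) 1).foldl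
      (fun acc start =>
        if colors.toList.getD start.toNat ' ' = 'B' then
          (adjLst.getD start.toNat []).foldl (fun a adj => a + memo.getD adj.toNat 0) acc
        else acc) 0

-- ===== PORT B =====
-- `while i < len(row) and memo[row[i]] > -1: i += 1`
def pvAdvance (memo : List Int) (row : List Int) (i : Nat) : Nat :=
  if h : i < row.length then
    if memo.getD (row[i]).toNat (-1) > -1 then pvAdvance memo row (i + 1) else i
  else i
  termination_by row.length - i

-- B's while-True loop: extra state ptr (per-node adjacency pointer); same fuel guard.
def dfsLoopB (adjLst : List (List Int)) (cs : List Char) :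
    Nat → List Int → List Nat → PySem.Dict Int (PySem.Set Int) → List (Int × Int) → Int → Int → List Int
  | 0, memo, _, _, _, _, _ => memo
  | fuel + 1, memo, ptr, rg, stack, cur, black =>
    let row := adjLst.getD cur.toNat []
    let i := pvAdvance memo row (ptr.getD cur.toNat 0)
    let ptr1 := ptr.set cur.toNat i
    if h : i < row.length then
      let nxt := row[i]
      let memo1 := memo.set nxt.toNat 0
      if cs.getD nxt.toNat ' ' = 'B' then
        dfsLoopB adjLst cs fuel memo1 ptr1 rg ((cur, black) :: stack) nxt nxt
      else
        dfsLoopB adjLst cs fuel memo1 ptr1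
          (rg.insert black (PySem.Set.add ((rg.get? black).getD PySem.Set.empty) nxt))
          ((cur, black) :: stack) nxt black
    else
      match stack with
      | [] => memo
      | (c, b) :: rest =>
        if c = b then
          let grp : PySem.Set Int := (rg.get? c).getD PySem.Set.empty
          dfsLoopB adjLst cs fuel
            (grp.foldl (fun m r => m.set r.toNat (grp.length : Int)) memo)
            ptr1 (rg.erase c) rest c b
        else
          dfsLoopB adjLst cs fuel memo ptr1 rg rest c b

def solution_alt (N : Int) (adjLst : List (List Int)) (colors : String) : Int :=
  let start := PySem.Str.find colors "B"
  if start < 0 then 0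
  else
    let memo := dfsLoopB adjLst colors.toList (2 * (N + 1).toNat + 2)
      ((List.replicate (N + 1).toNat (-1)).set start.toNat 0)
      (List.replicate adjLst.length 0) PySem.Dict.empty [] start start
    (((PySem.List.pyRange 1 (colors.toList.length : Int) 1).filter
        (fun v => colors.toList.getD v.toNat ' ' = 'B')).flatMap
        (fun v => adjLst.getD v.toNat [])).foldl (fun a adj => a + memo.getD adj.toNat 0) 0

-- ===== PRECONDITION & SPEC =====
-- Pre_ admits every colors without 'B' (A returns 0 trivially) and otherwise fixes the problem's
-- natural shape: N ≥ 0, adjacency tuple and color string of length N+1, neighbour ids in 0..N.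
-- Outside that shape A raises IndexError on some reachable index, except for accidental cases
-- (unused out-of-shape tails) that are excluded although A still returns — see claim cites.
def Pre_solution (N : Int) (adjLst : List (List Int)) (colors : String) : Prop :=
  ('B' ∉ colors.toList) ∨
    (0 ≤ N ∧ adjLst.length = (N + 1).toNat ∧ colors.toList.length = (N + 1).toNat ∧
      ∀ row ∈ adjLst, ∀ a ∈ row, 0 ≤ a ∧ a ≤ N)
instance (N : Int) (adjLst : List (List Int)) (colors : String) : Decidable (Pre_solution N adjLst colors) := by
  unfold Pre_solution; infer_instance

def pvWitness_solution : Int × List (List Int) × String := (2, [[], [2], [1]], "_BR")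

def Spec_solution (N : Int) (adjLst : List (List Int)) (colors : String) (out : Int) : Prop :=
  out = solution_alt N adjLst colors
instance (N : Int) (adjLst : List (List Int)) (colors : String) (out : Int) : Decidable (Spec_solution N adjLst colors out) := by
  unfold Spec_solution; infer_instance

-- ===== CLAIM (what is proved, stated in full; the proofs are below) =====
def Claim_equal_solution : Prop := ∀ (N : Int) (adjLst : List (List Int)) (colors : String), Dom_solution N adjLst colors → Pre_solution N adjLst colors → Spec_solution N adjLst colors (solution N adjLst colors)

-- ===== LEMMAS AND PROOFS =====

theorem solution_witness_pre :
    Dom_solution pvWitness_solution.1 pvWitness_solution.2.1 pvWitness_solution.2.2 ∧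
    Pre_solution pvWitness_solution.1 pvWitness_solution.2.1 pvWitness_solution.2.2 := by
  constructor <;> decide


-- generic facts about List.set / getD used throughout
theorem pvGetD_set {α : Type} (l : List α) (k i : Nat) (v d : α) :
    (l.set k v).getD i d = if k = i ∧ k < l.length then v else l.getD i d := by
  rcases eq_or_ne k i with rfl | hne
  · by_cases h : k < l.length <;> simp [List.getD, h]
  · simp [List.getD, hne]

theorem pvSet_id {α : Type} (l : List α) (k : Nat) (v d : α) (h : k < l.length) (hv : l.getD k d = v) :
    l.set k v = l := by
  apply List.ext_getElem
  · simp
  · intro i h1 h2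
    rcases eq_or_ne k i with rfl | hne
    · simp only [List.getD, List.getElem?_eq_getElem h, Option.getD_some] at hv
      simp [hv]
    · simp [List.getElem_set_ne hne]

-- writes of nonnegative values keep entries "visited" (> -1)
theorem pvVis_set (l : List Int) (k : Nat) (v : Int) (hv : 0 ≤ v) (i : Nat)
    (h : -1 < l.getD i (-1)) : -1 < (l.set k v).getD i (-1) := by
  rw [pvGetD_set]; split
  · omega
  · exact h

-- the group-assignment loop `for red in grp: memo[red] = n`
theorem pvFoldlSet_length (g : List Int) (n : Int) (memo : List Int) :
    (g.foldl (fun m r => m.set r.toNat n) memo).length = memo.length := by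
  induction g generalizing memo with
  | nil => rfl
  | cons x t ih => simp [List.foldl_cons, ih]

theorem pvFoldlSet_getD_ne (g : List Int) (n : Int) (memo : List Int) (i : Nat) (d : Int)
    (h : ∀ r ∈ g, r.toNat ≠ i) :
    (g.foldl (fun m r => m.set r.toNat n) memo).getD i d = memo.getD i d := by
  induction g generalizing memo with
  | nil => rfl
  | cons x t ih =>
    simp only [List.foldl_cons]
    rw [ih _ (fun r hr => h r (List.mem_cons_of_mem _ hr)), pvGetD_set]
    have := h x (List.mem_cons_self ..)
    simp [this]

theorem pvVis_foldlSet (g : List Int) (n : Int) (hn : 0 ≤ n) (memo : List Int) (i : Nat)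
    (h : -1 < memo.getD i (-1)) :
    -1 < (g.foldl (fun m r => m.set r.toNat n) memo).getD i (-1) := by
  induction g generalizing memo with
  | nil => exact h
  | cons x t ih => exact ih _ (pvVis_set _ _ _ hn _ h)

-- Dict.erase lookups (no such lemmas in the prelude)
theorem pvGet?_erase_self (d : PySem.Dict Int (PySem.Set Int)) (k : Int) :
    (d.erase k).get? k = none := by
  simp [PySem.Dict.erase, PySem.Dict.get?]

theorem pvFind?_filter_ne (l : List (Int × PySem.Set Int)) (k k' : Int) (h : k' ≠ k) :
    List.find? (fun p => p.1 == k') (l.filter (fun p => !(p.1 == k)))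
      = List.find? (fun p => p.1 == k') l := by
  induction l with
  | nil => rfl
  | cons p t ih =>
    rw [List.filter_cons]
    by_cases hp : (p.1 == k) = true
    · have hk : p.1 = k := by simpa using hp
      have h1 : ¬ ((fun p : Int × PySem.Set Int => p.1 == k') p = true) := by
        intro e
        exact h (by rw [← hk]; symm; simpa using e)
      rw [if_neg (by simp [hp]),
        List.find?_cons_of_neg (p := fun p : Int × PySem.Set Int => p.1 == k') (a := p) (l := t) h1]
      exact ih
    · rw [if_pos (by simp [hp])]
      by_cases hq : ((fun p : Int × PySem.Set Int => p.1 == k') p = true)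
      · rw [List.find?_cons_of_pos (p := fun p : Int × PySem.Set Int => p.1 == k') (a := p) hq,
          List.find?_cons_of_pos (p := fun p : Int × PySem.Set Int => p.1 == k') (a := p) hq]
      · rw [List.find?_cons_of_neg (p := fun p : Int × PySem.Set Int => p.1 == k') (a := p)
            (l := t.filter (fun p => !(p.1 == k))) hq,
          List.find?_cons_of_neg (p := fun p : Int × PySem.Set Int => p.1 == k') (a := p) (l := t) hq]
        exact ih

theorem pvGet?_erase_ne (d : PySem.Dict Int (PySem.Set Int)) (k k' : Int) (h : k' ≠ k) :
    (d.erase k).get? k' = d.get? k' := by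
  obtain ⟨l⟩ := d
  simp only [PySem.Dict.erase, PySem.Dict.get?]
  rw [pvFind?_filter_ne l k k' h]

-- what B's pointer-advance loop computes
theorem pvAdvance_spec (memo : List Int) (row : List Int) :
    ∀ i0, i0 ≤ row.length →
    (∀ j (hj : j < row.length), j < i0 → -1 < memo.getD (row[j]).toNat (-1)) →
    i0 ≤ pvAdvance memo row i0 ∧ pvAdvance memo row i0 ≤ row.length ∧
    (∀ j (hj : j < row.length), j < pvAdvance memo row i0 → -1 < memo.getD (row[j]).toNat (-1)) ∧
    (∀ h : pvAdvance memo row i0 < row.length,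
      ¬ (-1 < memo.getD (row[pvAdvance memo row i0]).toNat (-1))) := by
  intro i0
  fun_induction pvAdvance memo row i0 with
  | case1 i h hv ih =>
    intro hle hpre
    obtain ⟨h1, h2, h3, h4⟩ := ih (by omega)
      (fun j hj hji => by
        rcases Nat.lt_or_ge j i with hj' | hj'
        · exact hpre j hj hj'
        · have : j = i := by omega
          subst this; exact hv)
    exact ⟨by omega, h2, h3, h4⟩
  | case2 i h hv =>
    intro hle hpre
    exact ⟨le_refl _, by omega, hpre, fun _ => hv⟩
  | case3 i h =>
    intro hle hpre
    exact ⟨le_refl _, hle, hpre, fun hlt => absurd hlt h⟩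

-- first-unvisited via find? equals first-unvisited via index scan
theorem pvFind?_char (q : Int → Bool) :
    ∀ (row : List Int) (i : Nat), i ≤ row.length →
    (∀ j (hj : j < row.length), j < i → q row[j] = false) →
    (∀ h : i < row.length, q row[i] = true) →
    row.find? q = if h : i < row.length then some row[i] else none := by
  intro row
  induction row with
  | nil => intro i h _ _; simp
  | cons x t ih =>
    intro i hle hpre hat
    cases i with
    | zero =>
      have hx : q x = true := by simpa using hat (by simp)
      simp [List.find?_cons_of_pos (p := q) hx]
    | succ j =>
      have hx : q x = false := hpre 0 (by simp) (by omega)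
      simp only [List.find?_cons, hx]
      have := ih j (by simpa using hle)
        (fun m hm hmj => by simpa using hpre (m+1) (by simpa using hm) (by omega))
        (fun h => by simpa using hat (by simpa using h))
      rw [this]
      by_cases h : j < t.length <;> simp [h]

-- ptr-invariant preservation: one pointer write at cur plus a visited-monotone memo change
theorem pvPtrStep (adjLst : List (List Int)) (memo memo' : List Int) (ptr : List Nat)
    (cur : Int) (i : Nat) (hcl : cur.toNat < adjLst.length) (hptl : ptr.length = adjLst.length)
    (hpti : ∀ v < adjLst.length, ptr.getD v 0 ≤ (adjLst.getD v []).length ∧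
      ∀ j (hj : j < (adjLst.getD v []).length), j < ptr.getD v 0 →
        -1 < memo.getD ((adjLst.getD v [])[j]).toNat (-1))
    (hile : i ≤ (adjLst.getD cur.toNat []).length)
    (hvispre : ∀ j (hj : j < (adjLst.getD cur.toNat []).length), j < i →
        -1 < memo.getD ((adjLst.getD cur.toNat [])[j]).toNat (-1))
    (hmono : ∀ a : Nat, -1 < memo.getD a (-1) → -1 < memo'.getD a (-1)) :
    ∀ v < adjLst.length, (ptr.set cur.toNat i).getD v 0 ≤ (adjLst.getD v []).length ∧
      ∀ j (hj : j < (adjLst.getD v []).length), j < (ptr.set cur.toNat i).getD v 0 →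
        -1 < memo'.getD ((adjLst.getD v [])[j]).toNat (-1) := by
  intro v hv
  rw [pvGetD_set]
  by_cases hvc : cur.toNat = v
  · subst hvc
    rw [if_pos ⟨rfl, by omega⟩]
    exact ⟨hile, fun j hj hji => hmono _ (hvispre j hj hji)⟩
  · rw [if_neg (fun hcon => hvc hcon.1)]
    obtain ⟨h1, h2⟩ := hpti v hv
    exact ⟨h1, fun j hj hji => hmono _ (h2 j hj hji)⟩

-- the loop invariant tying B's state (with pointer array ptr) to A's
structure PvInv (N : Int) (adjLst : List (List Int)) (cs : List Char) (memo : List Int)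
    (ptr : List Nat) (rg : PySem.Dict Int (PySem.Set Int)) (stack : List (Int × Int))
    (cur black : Int) : Prop where
  memo_len : memo.length = (N + 1).toNat
  cur_lb : 0 ≤ cur
  cur_ub : cur ≤ N
  black_lb : 0 ≤ black
  black_ub : black ≤ N
  black_B : cs.getD black.toNat ' ' = 'B'
  cur_vis : memo.getD cur.toNat (-1) = 0
  stack_ok : ∀ p ∈ stack, 0 ≤ p.1 ∧ p.1 ≤ N ∧ 0 ≤ p.2 ∧ p.2 ≤ N ∧
      memo.getD p.1.toNat (-1) = 0 ∧ cs.getD p.2.toNat ' ' = 'B'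
  nodup : (cur :: stack.map Prod.fst).Nodup
  black_stack : black = cur ∨ (black, black) ∈ stack
  stack_order : ∀ s1 c b s2, stack = s1 ++ (c, b) :: s2 → c = b ∨ (b, b) ∈ s2
  rg_mem : ∀ k g, rg.get? k = some g → ∀ r ∈ g, 0 ≤ r ∧ r ≤ N ∧
      cs.getD r.toNat ' ' ≠ 'B' ∧ 0 ≤ memo.getD r.toNat (-1)
  rg_stack : ∀ k g, rg.get? k = some g → ∀ r ∈ g,
      (∀ s1 b0 s2, stack = s1 ++ (r, b0) :: s2 → (k, k) ∈ s2) ∧ (r = cur → (k, k) ∈ stack)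
  ptr_len : ptr.length = adjLst.length
  ptr_inv : ∀ v : Nat, v < adjLst.length →
      ptr.getD v 0 ≤ (adjLst.getD v []).length ∧
      ∀ j (hj : j < (adjLst.getD v []).length), j < ptr.getD v 0 →
        -1 < memo.getD ((adjLst.getD v [])[j]).toNat (-1)

-- the main bisimulation: A's rescanning loop and B's pointer loop agree step by step
theorem pvLoop_eq (N : Int) (adjLst : List (List Int)) (cs : List Char)
    (hA : adjLst.length = (N + 1).toNat)
    (hR : ∀ row ∈ adjLst, ∀ a ∈ row, 0 ≤ a ∧ a ≤ N) :
    ∀ fuel (memoA memo : List Int) ptr rg stack cur black,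
      memoA.set cur.toNat 0 = memo →
      PvInv N adjLst cs memo ptr rg stack cur black →
      memoizeLoopA adjLst cs fuel memoA rg stack cur black
        = dfsLoopB adjLst cs fuel memo ptr rg stack cur black := by
  intro fuel
  induction fuel with
  | zero =>
    intro memoA memo ptr rg stack cur black hAB _hInv
    simp only [memoizeLoopA, dfsLoopB]
    exact hAB
  | succ fuel ih =>
    intro memoA memo ptr rg stack cur black hAB hInv
    obtain ⟨hml, hc0, hcN, hb0, hbN, hbB, hcv, hsok, hnd, hbs, hso, hrgm, hrgs, hptl, hpti⟩ := hInv
    have hcl : cur.toNat < adjLst.length := by rw [hA]; omega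
    have hrowmem : adjLst.getD cur.toNat [] ∈ adjLst := by
      rw [List.getD_eq_getElem _ _ hcl]; exact List.getElem_mem hcl
    have hra := hR _ hrowmem
    obtain ⟨hple, hpvis⟩ := hpti cur.toNat hcl
    obtain ⟨hige, hile, hvispre, hstop⟩ :=
      pvAdvance_spec memo (adjLst.getD cur.toNat []) (ptr.getD cur.toNat 0) hple hpvis
    simp only [memoizeLoopA, dfsLoopB]
    rw [hAB]
    have hfind : (adjLst.getD cur.toNat []).find?
        (fun adj => decide (memo.getD adj.toNat (-1) ≤ -1)) =
        if _h : pvAdvance memo (adjLst.getD cur.toNat []) (ptr.getD cur.toNat 0) <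
            (adjLst.getD cur.toNat []).length then
          some ((adjLst.getD cur.toNat [])[pvAdvance memo (adjLst.getD cur.toNat [])
            (ptr.getD cur.toNat 0)])
        else none := by
      apply pvFind?_char _ _ _ hile
      · intro j hj hji
        have := hvispre j hj hji
        simp only [decide_eq_false_iff_not]; omega
      · intro h
        have := hstop h
        simp only [decide_eq_true_eq]; omega
    by_cases hlt : pvAdvance memo (adjLst.getD cur.toNat []) (ptr.getD cur.toNat 0) <
        (adjLst.getD cur.toNat []).length
    · -- descend to the first unvisited neighbour
      rw [dif_pos hlt] at hfind
      simp only [hfind, dif_pos hlt]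
      set i := pvAdvance memo (adjLst.getD cur.toNat []) (ptr.getD cur.toNat 0) with hidef
      set adj := (adjLst.getD cur.toNat [])[i]'hlt with hadjdef
      have hadjmem : adj ∈ adjLst.getD cur.toNat [] := by
        rw [hadjdef]; exact List.getElem_mem hlt
      obtain ⟨ha0, haN⟩ := hra adj hadjmem
      have hunvis : memo.getD adj.toNat (-1) ≤ -1 := by
        have h' := hstop hlt
        rw [← hadjdef] at h'
        omega
      have hmlen : adj.toNat < memo.length := by rw [hml]; omega
      have hnecur : adj.toNat ≠ cur.toNat := by
        intro e; rw [e, hcv] at hunvis; omega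
      have hmono : ∀ a : Nat, -1 < memo.getD a (-1) → -1 < (memo.set adj.toNat 0).getD a (-1) :=
        fun a h => pvVis_set _ _ _ (by norm_num) _ h
      have hlen' : (memo.set adj.toNat 0).length = (N + 1).toNat := by
        rw [List.length_set, hml]
      have hcv' : (memo.set adj.toNat 0).getD adj.toNat (-1) = 0 := by
        rw [pvGetD_set, if_pos ⟨rfl, hmlen⟩]
      have hsok' : ∀ p ∈ (cur, black) :: stack, 0 ≤ p.1 ∧ p.1 ≤ N ∧ 0 ≤ p.2 ∧ p.2 ≤ N ∧
          (memo.set adj.toNat 0).getD p.1.toNat (-1) = 0 ∧ cs.getD p.2.toNat ' ' = 'B' := by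
        intro p hp
        rcases List.mem_cons.mp hp with hp' | hp'
        · subst hp'
          exact ⟨hc0, hcN, hb0, hbN, by rw [pvGetD_set, if_neg (fun hcon => hnecur hcon.1)]; exact hcv, hbB⟩
        · obtain ⟨q1, q2, q3, q4, q5, q6⟩ := hsok p hp'
          have hne : adj.toNat ≠ p.1.toNat := by
            intro e; rw [e, q5] at hunvis; omega
          exact ⟨q1, q2, q3, q4, by rw [pvGetD_set, if_neg (fun hcon => hne hcon.1)]; exact q5, q6⟩
      have hnd' : (adj :: List.map Prod.fst ((cur, black) :: stack)).Nodup := by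
        rw [List.map_cons, List.nodup_cons]
        refine ⟨?_, hnd⟩
        intro hmem
        rcases List.mem_cons.mp hmem with he | he
        · exact hnecur (by rw [he])
        · obtain ⟨p, hp, hpe⟩ := List.mem_map.mp he
          have q5 := (hsok p hp).2.2.2.2.1
          rw [hpe] at q5
          rw [q5] at hunvis; omega
      have hso' : ∀ s1 c b s2, (cur, black) :: stack = s1 ++ (c, b) :: s2 → c = b ∨ (b, b) ∈ s2 := by
        intro s1 c b s2 heq
        cases s1 with
        | nil =>
          simp only [List.nil_append] at heq
          injection heq with h1 h2
          have e1 : cur = c := congrArg Prod.fst h1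
          have e2 : black = b := congrArg Prod.snd h1
          subst e1; subst e2; subst h2
          rcases hbs with hbc | hmem
          · exact Or.inl hbc.symm
          · exact Or.inr hmem
        | cons hd t1 =>
          rw [List.cons_append] at heq
          injection heq with h1 h2
          exact hso t1 c b s2 h2
      have hptr' := pvPtrStep adjLst memo (memo.set adj.toNat 0) ptr cur i hcl hptl hpti hile hvispre hmono
      have hptl' : (ptr.set cur.toNat i).length = adjLst.length := by rw [List.length_set, hptl]
      by_cases hcol : cs.getD adj.toNat ' ' = 'B'
      · rw [if_pos hcol, if_pos hcol]
        refine ih memo (memo.set adj.toNat 0) (ptr.set cur.toNat i) rg ((cur, black) :: stack) adj adj rfl ?_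
        refine ⟨hlen', ha0, haN, ha0, haN, hcol, hcv', hsok', hnd', Or.inl rfl, hso', ?_, ?_, hptl', hptr'⟩
        · intro k g hg r hr
          obtain ⟨m1, m2, m3, m4⟩ := hrgm k g hg r hr
          exact ⟨m1, m2, m3, by have := hmono r.toNat (by omega); omega⟩
        · intro k g hg r hr
          obtain ⟨o1, o2⟩ := hrgs k g hg r hr
          constructor
          · intro s1 b0 s2 heq
            cases s1 with
            | nil =>
              simp only [List.nil_append] at heq
              injection heq with h1 h2
              have e1 : cur = r := congrArg Prod.fst h1
              subst h2
              exact o2 e1.symm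
            | cons hd t1 =>
              rw [List.cons_append] at heq
              injection heq with h1 h2
              exact (o1 t1 b0 s2 h2)
          · intro hre
            have m4 := (hrgm k g hg r hr).2.2.2
            rw [hre] at m4
            omega
      · rw [if_neg hcol, if_neg hcol]
        have hbsnew : (black, black) ∈ (cur, black) :: stack := by
          rcases hbs with hbc | hmem
          · exact List.mem_cons.mpr (Or.inl (by rw [hbc]))
          · exact List.mem_cons_of_mem _ hmem
        refine ih memo (memo.set adj.toNat 0) (ptr.set cur.toNat i)
          (rg.insert black (((rg.get? black).getD PySem.Set.empty).add adj))
          ((cur, black) :: stack) adj black rfl ?_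
        refine ⟨hlen', ha0, haN, hb0, hbN, hbB, hcv', hsok', hnd', Or.inr hbsnew, hso', ?_, ?_, hptl', hptr'⟩
        · intro k g hg r hr
          by_cases hk : k = black
          · subst hk
            rw [PySem.Dict.get?_insert_self rg _ _] at hg
            have hge := Option.some.inj hg
            rw [← hge] at hr
            rw [PySem.Set.mem_add] at hr
            rcases hr with hr' | hr'
            · rcases hgb : rg.get? k with _ | g1
              · rw [hgb] at hr'; simp [PySem.Set.empty] at hr'
              · rw [hgb] at hr'
                simp only [Option.getD_some] at hr'
                obtain ⟨m1, m2, m3, m4⟩ := hrgm k g1 hgb r hr'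
                exact ⟨m1, m2, m3, by have := hmono r.toNat (by omega); omega⟩
            · subst hr'
              exact ⟨ha0, haN, hcol, by rw [hcv']⟩
          · rw [PySem.Dict.get?_insert_of_ne _ _ hk] at hg
            obtain ⟨m1, m2, m3, m4⟩ := hrgm k g hg r hr
            exact ⟨m1, m2, m3, by have := hmono r.toNat (by omega); omega⟩
        · intro k g hg r hr
          have hclause2 : ∀ s1 b0 s2, (cur, black) :: stack = s1 ++ (r, b0) :: s2 →
              (∀ (e : r = cur), (k, k) ∈ stack) →
              (∀ t1 b1 t2, stack = t1 ++ (r, b1) :: t2 → (k, k) ∈ t2) → (k, k) ∈ s2 := by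
            intro s1 b0 s2 heq hcur hold
            cases s1 with
            | nil =>
              simp only [List.nil_append] at heq
              injection heq with h1 h2
              have e1 : cur = r := congrArg Prod.fst h1
              subst h2
              exact hcur e1.symm
            | cons hd t1 =>
              rw [List.cons_append] at heq
              injection heq with h1 h2
              exact hold t1 b0 s2 h2
          by_cases hk : k = black
          · subst hk
            rw [PySem.Dict.get?_insert_self rg _ _] at hg
            have hge := Option.some.inj hg
            rw [← hge] at hr
            rw [PySem.Set.mem_add] at hr
            rcases hr with hr' | hr'
            · rcases hgb : rg.get? k with _ | g1
              · rw [hgb] at hr'; simp [PySem.Set.empty] at hr'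
              · rw [hgb] at hr'
                simp only [Option.getD_some] at hr'
                obtain ⟨o1, o2⟩ := hrgs k g1 hgb r hr'
                refine ⟨fun s1 b0 s2 heq => hclause2 s1 b0 s2 heq o2 o1, ?_⟩
                · intro hre
                  have m4 := (hrgm k g1 hgb r hr').2.2.2
                  rw [hre] at m4
                  omega
            · subst hr'
              constructor
              · intro s1 b0 s2 heq
                cases s1 with
                | nil =>
                  simp only [List.nil_append] at heq
                  injection heq with h1 h2
                  have e1 : cur = adj := congrArg Prod.fst h1
                  exact absurd (by rw [e1]) hnecur
                | cons hd t1 =>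
                  rw [List.cons_append] at heq
                  injection heq with h1 h2
                  have hmem : (adj, b0) ∈ stack := by
                    rw [h2]; exact List.mem_append.mpr (Or.inr (List.mem_cons_self ..))
                  have q5 := (hsok _ hmem).2.2.2.2.1
                  simp only at q5
                  rw [q5] at hunvis; omega
              · intro _; exact hbsnew
          · rw [PySem.Dict.get?_insert_of_ne _ _ hk] at hg
            obtain ⟨o1, o2⟩ := hrgs k g hg r hr
            refine ⟨fun s1 b0 s2 heq => hclause2 s1 b0 s2 heq o2 o1, ?_⟩
            intro hre
            have m4 := (hrgm k g hg r hr).2.2.2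
            rw [hre] at m4
            omega
    · -- no unvisited neighbour: backtrack
      rw [dif_neg hlt] at hfind
      simp only [hfind, dif_neg hlt]
      set i := pvAdvance memo (adjLst.getD cur.toNat []) (ptr.getD cur.toNat 0) with hidef
      have hptl' : (ptr.set cur.toNat i).length = adjLst.length := by rw [List.length_set, hptl]
      cases stack with
      | nil => rfl
      | cons hd rest =>
        obtain ⟨c, b⟩ := hd
        obtain ⟨q1, q2, q3, q4, q5, q6⟩ := hsok (c, b) (List.mem_cons_self ..)
        simp only at q1 q2 q3 q4 q5 q6
        have hcm : c.toNat < memo.length := by rw [hml]; omega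
        have hnd2 : (c :: List.map Prod.fst rest).Nodup := by
          have h' := (List.nodup_cons.mp hnd).2
          rw [List.map_cons] at h'
          exact h'
        have hso' : ∀ s1 c' b' s2, rest = s1 ++ (c', b') :: s2 → c' = b' ∨ (b', b') ∈ s2 :=
          fun s1 c' b' s2 heq => hso ((c, b) :: s1) c' b' s2 (by rw [heq, List.cons_append])
        dsimp only
        by_cases hcb : c = b
        case pos =>
          rw [if_pos hcb, if_pos hcb]
          set grp := (rg.get? c).getD PySem.Set.empty with hgrpdef
          have hcB : cs.getD c.toNat ' ' = 'B' := by rw [hcb]; exact q6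
          have hgmem : ∀ r ∈ grp, ∃ g1, rg.get? c = some g1 ∧ r ∈ g1 := by
            intro r hr
            rcases hgc : rg.get? c with _ | g1
            · rw [hgrpdef, hgc] at hr; simp [PySem.Set.empty] at hr
            · rw [hgrpdef, hgc] at hr
              exact ⟨g1, rfl, hr⟩
          have hgne : ∀ r ∈ grp, r.toNat ≠ c.toNat := by
            intro r hr
            obtain ⟨g1, hgc, hr1⟩ := hgmem r hr
            obtain ⟨m1, m2, m3, m4⟩ := hrgm c g1 hgc r hr1
            intro e
            have hrc : r = c := by omega
            rw [hrc] at m3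
            exact m3 hcB
          have hWc : (grp.foldl (fun m r => m.set r.toNat (grp.length : Int)) memo).getD c.toNat (-1) = 0 := by
            rw [pvFoldlSet_getD_ne _ _ _ _ _ hgne]; exact q5
          have hWlen : (grp.foldl (fun m r => m.set r.toNat (grp.length : Int)) memo).length = (N + 1).toNat := by
            rw [pvFoldlSet_length, hml]
          have hmono : ∀ a : Nat, -1 < memo.getD a (-1) →
              -1 < (grp.foldl (fun m r => m.set r.toNat (grp.length : Int)) memo).getD a (-1) :=
            fun a h => pvVis_foldlSet _ _ (Int.natCast_nonneg _) _ _ h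
          have hrest_ne : ∀ p ∈ rest, ∀ r ∈ grp, r.toNat ≠ p.1.toNat := by
            intro p hp r hr
            obtain ⟨g1, hgc, hr1⟩ := hgmem r hr
            obtain ⟨m1, m2, m3, m4⟩ := hrgm c g1 hgc r hr1
            obtain ⟨p1, p2, p3, p4, p5, p6⟩ := hsok p (List.mem_cons_of_mem _ hp)
            intro e
            have hrp : r = p.1 := by omega
            obtain ⟨t1, t2, ht⟩ := List.append_of_mem hp
            have o1 := (hrgs c g1 hgc r hr1).1 ((c, b) :: t1) p.2 t2
              (by rw [ht, hrp, List.cons_append])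
            have hcmem : c ∈ List.map Prod.fst rest := by
              rw [ht]
              refine List.mem_map.mpr ⟨(c, c), ?_, rfl⟩
              exact List.mem_append.mpr (Or.inr (List.mem_cons_of_mem _ o1))
            exact (List.nodup_cons.mp hnd2).1 hcmem
          have hWrest : ∀ p ∈ rest,
              (grp.foldl (fun m r => m.set r.toNat (grp.length : Int)) memo).getD p.1.toNat (-1) = 0 := by
            intro p hp
            rw [pvFoldlSet_getD_ne _ _ _ _ _ (fun r hr => hrest_ne p hp r hr)]
            exact (hsok p (List.mem_cons_of_mem _ hp)).2.2.2.2.1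
          refine ih _ _ (ptr.set cur.toNat i) (rg.erase c) rest c b
            (pvSet_id _ _ _ (-1) (by rw [pvFoldlSet_length]; exact hcm) hWc) ?_
          refine ⟨hWlen, q1, q2, q3, q4, q6, ?_, ?_, hnd2, Or.inl hcb.symm, hso', ?_, ?_, hptl',
            pvPtrStep adjLst memo _ ptr cur i hcl hptl hpti hile hvispre hmono⟩
          · exact hWc
          · intro p hp
            obtain ⟨p1, p2, p3, p4, p5, p6⟩ := hsok p (List.mem_cons_of_mem _ hp)
            exact ⟨p1, p2, p3, p4, hWrest p hp, p6⟩
          · intro k g hg r hr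
            by_cases hkc : k = c
            · rw [hkc, pvGet?_erase_self] at hg
              exact absurd hg (by simp)
            · rw [pvGet?_erase_ne _ _ _ hkc] at hg
              obtain ⟨m1, m2, m3, m4⟩ := hrgm k g hg r hr
              exact ⟨m1, m2, m3, by have := hmono r.toNat (by omega); omega⟩
          · intro k g hg r hr
            by_cases hkc : k = c
            · rw [hkc, pvGet?_erase_self] at hg
              exact absurd hg (by simp)
            · rw [pvGet?_erase_ne _ _ _ hkc] at hg
              obtain ⟨o1, o2⟩ := hrgs k g hg r hr
              constructor
              · intro s1 b0 s2 heq
                exact o1 ((c, b) :: s1) b0 s2 (by rw [heq, List.cons_append])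
              · intro hre
                have m3 := (hrgm k g hg r hr).2.2.1
                rw [hre] at m3
                exact absurd hcB m3
        case neg =>
          rw [if_neg hcb, if_neg hcb]
          refine ih memo memo (ptr.set cur.toNat i) rg rest c b (pvSet_id _ _ _ (-1) hcm q5) ?_
          refine ⟨hml, q1, q2, q3, q4, q6, q5, fun p hp => hsok p (List.mem_cons_of_mem _ hp),
            hnd2, ?_, hso', hrgm, ?_, hptl',
            pvPtrStep adjLst memo memo ptr cur i hcl hptl hpti hile hvispre (fun a h => h)⟩
          · rcases hso [] c b rest (by rw [List.nil_append]) with h' | h'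
            · exact Or.inl h'.symm
            · exact Or.inr h'
          · intro k g hg r hr
            obtain ⟨o1, o2⟩ := hrgs k g hg r hr
            constructor
            · intro s1 b0 s2 heq
              exact o1 ((c, b) :: s1) b0 s2 (by rw [heq, List.cons_append])
            · intro hre
              exact o1 [] b rest (by rw [hre, List.nil_append])

-- the two answer folds (A: nested loop with a guard; B: fold over a filtered flatMap) agree
theorem pvSum_eq (adjLst : List (List Int)) (cs : List Char) (memo : List Int) :
    (PySem.List.pyRange 1 (cs.length : Int) 1).foldl
      (fun acc start => if cs.getD start.toNat ' ' = 'B' then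
          (adjLst.getD start.toNat []).foldl (fun a adj => a + memo.getD adj.toNat 0) acc
        else acc) 0
      = (((PySem.List.pyRange 1 (cs.length : Int) 1).filter
          (fun v => cs.getD v.toNat ' ' = 'B')).flatMap
          (fun v => adjLst.getD v.toNat [])).foldl (fun a adj => a + memo.getD adj.toNat 0) 0 := by
  rw [List.foldl_flatMap, List.foldl_filter]
  simp only [decide_eq_true_eq]

theorem pvGetD_replicate {α : Type} (n v : Nat) (d : α) :
    (List.replicate n d).getD v d = d := by
  rcases Nat.lt_or_ge v n with h | h
  · rw [List.getD_eq_getElem _ _ (by simpa using h), List.getElem_replicate]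
  · rw [List.getD_eq_default _ _ (by simpa using h)]

-- ===== VERDICT(by name: the statement is the Claim_ definition above) =====
theorem solution_spec : Claim_equal_solution := by
  unfold Claim_equal_solution Spec_solution
  intro N adjLst colors _hDom hPre
  unfold solution solution_alt
  by_cases hf : PySem.Str.find colors "B" < 0
  · simp only [if_pos hf]
  · simp only [if_neg hf]
    -- a 'B' was found, so Pre_'s shape branch applies
    have hmem : 'B' ∈ colors.toList := by
      have hne : PySem.Chars.find colors.toList ['B'] ≠ -1 := by
        intro h
        have : PySem.Str.find colors "B" = -1 := by simpa using h
        omega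
      exact (PySem.Chars.find_ne_neg_one_iff _ _).mp (by simpa using hne) |>.subset
        (List.mem_singleton_self _)
    rcases hPre with hPre | ⟨hN, hAlen, hClen, hR⟩
    · exact absurd hmem hPre
    have hs0 : 0 ≤ PySem.Str.find colors "B" := by omega
    have hspec := PySem.Chars.find_spec (s := colors.toList) (sub := ['B']) (by simpa using hs0)
    obtain ⟨t, ht⟩ := hspec.1
    have hsl : (PySem.Str.find colors "B").toNat < colors.toList.length := by
      have h1 : colors.toList.drop (PySem.Chars.find colors.toList ['B']).toNat ≠ [] := by
        rw [← ht]; simp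
      have h2 := List.length_drop (l := colors.toList)
        (i := (PySem.Chars.find colors.toList ['B']).toNat)
      have h3 : colors.toList.drop (PySem.Chars.find colors.toList ['B']).toNat ≠ [] →
          0 < (colors.toList.drop (PySem.Chars.find colors.toList ['B']).toNat).length := by
        intro hne; exact List.length_pos_of_ne_nil hne
      have h4 := h3 h1
      have he : PySem.Str.find colors "B" = PySem.Chars.find colors.toList ['B'] := by simp
      rw [he]; omega
    have hgB : colors.toList.getD (PySem.Str.find colors "B").toNat ' ' = 'B' := by
      have he : PySem.Str.find colors "B" = PySem.Chars.find colors.toList ['B'] := by simp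
      have h0 : (colors.toList.drop (PySem.Chars.find colors.toList ['B']).toNat)[0]? = some 'B' := by
        rw [← ht]; rfl
      rw [List.getElem?_drop] at h0
      have h0' : colors.toList[(PySem.Chars.find colors.toList ['B']).toNat]? = some 'B' := by
        simpa using h0
      rw [he, List.getD, h0']
      rfl
    have hsN : PySem.Str.find colors "B" ≤ N := by
      rw [hClen] at hsl; omega
    have hml0 : (PySem.Str.find colors "B").toNat < (List.replicate (N + 1).toNat (-1 : Int)).length := by
      rw [List.length_replicate, ← hClen]; exact hsl
    have hInv : PvInv N adjLst colors.toList
        ((List.replicate (N + 1).toNat (-1)).set (PySem.Str.find colors "B").toNat 0)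
        (List.replicate adjLst.length 0) PySem.Dict.empty []
        (PySem.Str.find colors "B") (PySem.Str.find colors "B") := by
      refine ⟨?_, hs0, hsN, hs0, hsN, hgB, ?_, ?_, ?_, Or.inl rfl, ?_, ?_, ?_, ?_, ?_⟩
      · rw [List.length_set, List.length_replicate]
      · rw [pvGetD_set, if_pos ⟨rfl, hml0⟩]
      · intro p hp; exact absurd hp (List.not_mem_nil)
      · simp
      · intro s1 c b s2 heq
        exact absurd heq (by simp)
      · intro k g hg
        rw [PySem.Dict.get?_empty] at hg
        exact absurd hg (by simp)
      · intro k g hg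
        rw [PySem.Dict.get?_empty] at hg
        exact absurd hg (by simp)
      · rw [List.length_replicate]
      · intro v hv
        rw [pvGetD_replicate]
        exact ⟨Nat.zero_le _, fun j hj hj0 => absurd hj0 (by omega)⟩
    have hmemo : memoizeA N adjLst colors.toList (PySem.Str.find colors "B")
        = dfsLoopB adjLst colors.toList (2 * (N + 1).toNat + 2)
          ((List.replicate (N + 1).toNat (-1)).set (PySem.Str.find colors "B").toNat 0)
          (List.replicate adjLst.length 0) PySem.Dict.empty []
          (PySem.Str.find colors "B") (PySem.Str.find colors "B") :=
      pvLoop_eq N adjLst colors.toList hAlen hR (2 * (N + 1).toNat + 2)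
        (List.replicate (N + 1).toNat (-1)) _ _ _ _ _ _ rfl hInv
    rw [hmemo]
    exact pvSum_eq adjLst colors.toList _
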